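-- pv_equiv track=rewrite | github.com/pypi-data/pypi-mirror-374 | packages/homalos-ctp/homalos_ctp-6.7.11.1-cp313-cp313-win_amd64.whl/ctp/api/generator/generate_helper.py | replace_function_name
-- ===== SOURCE A (Python) =====
-- def replace_function_name(func_name: str) -> str:
--     # 定义前缀映射表：原前缀 -> 新前缀
--     prefix_mapping = {
--         "Req": "req",
--         "Create": "create",
--         "Get": "get",
--         "Release": "release",
--         "Init": "init",
--         "Join": "join",
--         "Exit": "exit",
--         "Register": "register",
--         "Subscribe": "subscribe",
--         "UnSubscribe": "unSubscribe",  # 特殊处理，保持第二个单词首字母大写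
--         "Submit": "submit"
--     }
--     # 检查每个前缀，只替换开头匹配的部分
--     for old_prefix, new_prefix in prefix_mapping.items():
--         if func_name.startswith(old_prefix):
--             # 只替换开头的部分，保留剩余部分不变
--             return new_prefix + func_name[len(old_prefix):]
--
--     # 如果没有匹配的前缀，返回原函数名
--     return func_name
-- ===== SOURCE B (Python) =====
-- _PREFIXES = ("Req", "Create", "Get", "Release", "Init", "Join", "Exit",
--              "Register", "Subscribe", "UnSubscribe", "Submit")
--
--
-- def replace_function_name(func_name: str) -> str:
--     # Every mapping entry just lowercases the first character of the prefix,
--     # so one membership test plus a first-character case fold suffices.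
--     if func_name.startswith(_PREFIXES):
--         return func_name[:1].lower() + func_name[1:]
--     return func_name
-- ===== Notes on version B (the rewrite author's own statement) =====
-- stated objective: simpler
-- what changed: Replaces the per-entry mapping loop (stored new prefix + suffix concatenation) with a single startswith-on-tuple membership test and a first-character case fold, exploiting that every mapping entry only lowercases the first character.
import Mathlib
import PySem

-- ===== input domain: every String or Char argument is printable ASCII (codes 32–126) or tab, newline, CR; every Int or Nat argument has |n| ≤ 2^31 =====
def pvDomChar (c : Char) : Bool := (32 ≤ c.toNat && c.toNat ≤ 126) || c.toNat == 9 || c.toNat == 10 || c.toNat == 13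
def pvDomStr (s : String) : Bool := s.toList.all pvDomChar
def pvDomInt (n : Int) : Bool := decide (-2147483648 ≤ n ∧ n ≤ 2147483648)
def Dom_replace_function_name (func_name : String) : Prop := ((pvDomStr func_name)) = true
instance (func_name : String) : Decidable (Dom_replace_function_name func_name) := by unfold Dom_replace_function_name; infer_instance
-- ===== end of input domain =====

-- B replaces A's per-entry mapping loop with one prefix membership test plus a
-- first-character case fold (every mapping entry only lowercases char 0); simpler, same cost.

-- ===== PORT A =====
-- the dict literal, in insertion order
def pvMappingA : List (List Char × List Char) :=
  [("Req".toList, "req".toList), ("Create".toList, "create".toList),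
   ("Get".toList, "get".toList), ("Release".toList, "release".toList),
   ("Init".toList, "init".toList), ("Join".toList, "join".toList),
   ("Exit".toList, "exit".toList), ("Register".toList, "register".toList),
   ("Subscribe".toList, "subscribe".toList), ("UnSubscribe".toList, "unSubscribe".toList),
   ("Submit".toList, "submit".toList)]

-- the 'for old_prefix, new_prefix in prefix_mapping.items():' loop with its early return
def pvLoopA : List (List Char × List Char) → List Char → List Char
  | [], fn => fn
  | (o, n) :: rest, fn =>
      if PySem.Chars.startswith fn o then
        n ++ PySem.Chars.slice fn (some (PySem.Chars.len o : Int)) none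
      else pvLoopA rest fn

def replace_function_name (func_name : String) : String :=
  String.ofList (pvLoopA pvMappingA func_name.toList)

-- ===== PORT B =====
def pvPrefixesB : List (List Char) :=
  ["Req".toList, "Create".toList, "Get".toList, "Release".toList, "Init".toList,
   "Join".toList, "Exit".toList, "Register".toList, "Subscribe".toList,
   "UnSubscribe".toList, "Submit".toList]

def replace_function_name_alt (func_name : String) : String :=
  let cs := func_name.toList
  if pvPrefixesB.any (fun p => PySem.Chars.startswith cs p) then
    String.ofList (PySem.Chars.lower (PySem.Chars.slice cs none (some 1)) ++
               PySem.Chars.slice cs (some 1) none)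
  else func_name

-- ===== PRECONDITION & SPEC =====
def Spec_replace_function_name (func_name : String) (out : String) : Prop := out = replace_function_name_alt func_name
instance (func_name : String) (out : String) : Decidable (Spec_replace_function_name func_name out) := by unfold Spec_replace_function_name; infer_instance

-- ===== CLAIM (what is proved, stated in full; the proofs are below) =====
def Claim_equal_replace_function_name : Prop := ∀ (func_name : String), Dom_replace_function_name func_name → Spec_replace_function_name func_name (replace_function_name func_name)

-- ===== LEMMAS AND PROOFS =====

-- each branch of A's loop agrees with B's case fold, given that the stored new
-- prefix is exactly the old prefix with its first character lowercased
lemma pvBranch_eq (o n cs : List Char) (ho : o ≠ [])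
    (hn : n = PySem.Chars.lower (o.take 1) ++ o.drop 1)
    (h : PySem.Chars.startswith cs o = true) :
    n ++ PySem.Chars.slice cs (some (PySem.Chars.len o : Int)) none =
      PySem.Chars.lower (cs.take 1) ++ cs.drop 1 := by
  obtain ⟨t, rfl⟩ := (PySem.Chars.startswith_iff cs o).mp h
  have h1 : 1 ≤ o.length := by
    cases o with
    | nil => exact absurd rfl ho
    | cons a l => simp
  simp only [PySem.Chars.slice_eq_listSlice, PySem.Chars.len_eq,
    PySem.List.slice_from_natCast, hn]
  rw [List.drop_append_of_le_length h1, List.take_append_of_le_length h1,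
    List.drop_left, List.append_assoc]

lemma pvLoopA_eq (ps : List (List Char × List Char)) (cs : List Char)
    (hp : ∀ p ∈ ps, p.1 ≠ [] ∧ p.2 = PySem.Chars.lower (p.1.take 1) ++ p.1.drop 1) :
    pvLoopA ps cs =
      if (ps.map Prod.fst).any (fun p => PySem.Chars.startswith cs p) then
        PySem.Chars.lower (cs.take 1) ++ cs.drop 1
      else cs := by
  induction ps with
  | nil => simp [pvLoopA]
  | cons hd tl ih =>
      obtain ⟨o, n⟩ := hd
      have hhd := hp (o, n) (by simp)
      by_cases h : PySem.Chars.startswith cs o = true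
      · have hb := pvBranch_eq o n cs hhd.1 hhd.2 h
        simp only [PySem.Chars.slice_eq_listSlice, PySem.Chars.len_eq,
          PySem.List.slice_from_natCast, List.drop_one] at hb
        simp [pvLoopA, h, hb, List.drop_one]
      · simp only [Bool.not_eq_true] at h
        rw [pvLoopA, if_neg (by simp [h]), ih (fun p hpmem => hp p (by simp [hpmem])),
          List.map_cons, List.any_cons, h, Bool.false_or]

-- ===== VERDICT (by name: the statement is the Claim_ definition above) =====
theorem replace_function_name_spec : Claim_equal_replace_function_name := by
  intro s _
  show replace_function_name s = replace_function_name_alt s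
  have hmap : pvMappingA.map Prod.fst = pvPrefixesB := by decide
  have hp : ∀ p ∈ pvMappingA, p.1 ≠ [] ∧
      p.2 = PySem.Chars.lower (p.1.take 1) ++ p.1.drop 1 := by decide
  unfold replace_function_name replace_function_name_alt
  rw [pvLoopA_eq pvMappingA s.toList hp, hmap]
  by_cases h : pvPrefixesB.any (fun p => PySem.Chars.startswith s.toList p) = true
  · simp [h, PySem.Chars.slice_eq_listSlice, PySem.List.slice_to, PySem.List.slice_from]
  · simp only [Bool.not_eq_true] at h
    simp [h, String.ofList_toList]
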